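-- pv_equiv track=rewrite | github.com/JamesWeatherhead/slm-phi-deid-evaluation | src/runner.py | get_primary_prompt_slugs
-- ===== SOURCE A (Python) =====
-- def get_primary_prompt_slugs(templates):
--     """Get just the 5 primary prompt slugs (no ablations)."""
--     primary = [
--         "zero-shot-minimal",
--         "zero-shot-structured",
--         "few-shot",
--         "two-pass",
--         "chain-of-thought",
--     ]
--     return [s for s in primary if any(
--         c.get("slug") == s for k, c in templates.items() if not k.startswith("_")
--     )]
-- ===== SOURCE B (Python) =====
-- def get_primary_prompt_slugs(templates):
--     """Get just the 5 primary prompt slugs (no ablations)."""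
--     primary = [
--         "zero-shot-minimal",
--         "zero-shot-structured",
--         "few-shot",
--         "two-pass",
--         "chain-of-thought",
--     ]
--     # Inverted traversal: ONE pass over the templates, recording which primary
--     # ranks occur, with early exit once all five are seen; the output is then
--     # rebuilt from the sorted ranks (no per-slug rescans of the dict).
--     rank = {s: i for i, s in enumerate(primary)}
--     found = set()
--     for k, c in templates.items():
--         if not k.startswith("_"):
--             i = rank.get(c.get("slug"))
--             if i is not None:
--                 found.add(i)
--                 if len(found) == len(primary):
--                     break
--     return [primary[i] for i in sorted(found)]
-- ===== Notes on version B (the rewrite author's own statement) =====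
-- stated objective: faster
-- what changed: B inverts the traversal: instead of A's loop over the five primary slugs with a nested any()-scan of all templates per slug, B makes a single pass over the templates recording the rank of each primary slug seen (with early exit once all five are found) and rebuilds the output from the sorted ranks.
import Mathlib
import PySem

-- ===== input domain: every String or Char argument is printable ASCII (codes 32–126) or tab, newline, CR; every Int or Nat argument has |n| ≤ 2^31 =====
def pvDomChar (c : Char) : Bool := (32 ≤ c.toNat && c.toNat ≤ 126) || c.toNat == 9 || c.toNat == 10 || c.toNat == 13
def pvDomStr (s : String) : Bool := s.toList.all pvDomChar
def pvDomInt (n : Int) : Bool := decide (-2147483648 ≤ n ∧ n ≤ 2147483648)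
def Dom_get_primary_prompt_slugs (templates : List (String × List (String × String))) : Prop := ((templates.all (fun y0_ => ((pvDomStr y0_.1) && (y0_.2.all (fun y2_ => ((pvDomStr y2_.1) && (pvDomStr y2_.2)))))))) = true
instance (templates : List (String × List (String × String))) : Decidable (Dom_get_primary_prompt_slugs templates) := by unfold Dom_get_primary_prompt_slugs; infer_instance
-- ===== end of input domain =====

-- B inverts the traversal: one pass over the templates recording the ranks of primary slugs seen
-- (early exit when all five are found), output rebuilt from the sorted ranks; a timing run measured B faster.


-- ===== PORT A =====
-- the fixed primary list (a shared literal constant of both Pythons)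
def pvPrimary : List String :=
  ["zero-shot-minimal", "zero-shot-structured", "few-shot", "two-pass", "chain-of-thought"]

-- c.get("slug"): first-match lookup in the association list (dict convention)
def pvSlugGet (c : List (String × String)) : Option String :=
  (c.find? (fun p => p.1 == "slug")).map (·.2)

-- A: for each fixed primary slug, scan all non-underscore templates with any()
def get_primary_prompt_slugs (templates : List (String × List (String × String))) : List String :=
  pvPrimary.filter (fun s =>
    templates.any (fun kc =>
      !(PySem.Str.startswith kc.1 "_") && (pvSlugGet kc.2 == some s)))

-- ===== PORT B =====
-- rank = {s: i for i, s in enumerate(primary)}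
def pvRank : PySem.Dict String Int :=
  (PySem.List.enumerate pvPrimary 0).foldl (fun d p => d.insert p.2 p.1) PySem.Dict.empty

-- rank.get(c.get("slug")): the None key is in no dict, so it yields None
def pvRankGet (o : Option String) : Option Int :=
  match o with
  | none => none
  | some s => pvRank.get? s

-- the for-loop over templates.items(), with its break once all five ranks are found
def pvLoop : List (String × List (String × String)) → PySem.Set Int → PySem.Set Int
  | [], found => found
  | kc :: rest, found =>
    if !(PySem.Str.startswith kc.1 "_") then
      match pvRankGet (pvSlugGet kc.2) with
      | some i =>
        let found' := PySem.Set.add found i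
        if PySem.Set.len found' == (pvPrimary.length : Int) then found'
        else pvLoop rest found'
      | none => pvLoop rest found
    else pvLoop rest found

-- B: [primary[i] for i in sorted(found)]
def get_primary_prompt_slugs_alt (templates : List (String × List (String × String))) : List String :=
  let found := pvLoop templates PySem.Set.empty
  (PySem.List.sorted found (fun x => x) false).map (fun i => PySem.List.pyGetD pvPrimary i "")

-- ===== PRECONDITION & SPEC =====
def Spec_get_primary_prompt_slugs (templates : List (String × List (String × String))) (out : List String) : Prop := out = get_primary_prompt_slugs_alt templates
instance (templates : List (String × List (String × String))) (out : List String) : Decidable (Spec_get_primary_prompt_slugs templates out) := by unfold Spec_get_primary_prompt_slugs; infer_instance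

-- ===== CLAIM (what is proved, stated in full; the proofs are below) =====
def Claim_equal_get_primary_prompt_slugs : Prop := ∀ (templates : List (String × List (String × String))), Dom_get_primary_prompt_slugs templates → Spec_get_primary_prompt_slugs templates (get_primary_prompt_slugs templates)

-- ===== LEMMAS AND PROOFS =====

-- the indices B's loop collects, as a filterMap over the same traversal
def pvIdx (l : List (String × List (String × String))) : List Int :=
  l.filterMap (fun kc =>
    if PySem.Str.startswith kc.1 "_" then none else pvRankGet (pvSlugGet kc.2))

def pvLits : List String :=
  ["zero-shot-minimal", "zero-shot-structured", "few-shot", "two-pass", "chain-of-thought"]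
lemma pvGet1 : PySem.List.pyGetD ["zero-shot-minimal", "zero-shot-structured", "few-shot", "two-pass", "chain-of-thought"] 1 "" = "zero-shot-structured" := rfl
lemma pvGet2 : PySem.List.pyGetD ["zero-shot-minimal", "zero-shot-structured", "few-shot", "two-pass", "chain-of-thought"] 2 "" = "few-shot" := rfl
lemma pvGet3 : PySem.List.pyGetD ["zero-shot-minimal", "zero-shot-structured", "few-shot", "two-pass", "chain-of-thought"] 3 "" = "two-pass" := rfl
lemma pvGet4 : PySem.List.pyGetD ["zero-shot-minimal", "zero-shot-structured", "few-shot", "two-pass", "chain-of-thought"] 4 "" = "chain-of-thought" := rfl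
lemma pvPrimary_eq : pvPrimary = pvLits := rfl

lemma pvRank_get? (s : String) : pvRank.get? s =
    (if s = "zero-shot-minimal" then some 0 else if s = "zero-shot-structured" then some 1
     else if s = "few-shot" then some 2 else if s = "two-pass" then some 3
     else if s = "chain-of-thought" then some 4 else none) := by
  by_cases h0 : s = "zero-shot-minimal"
  · subst h0; decide
  by_cases h1 : s = "zero-shot-structured"
  · subst h1; decide
  by_cases h2 : s = "few-shot"
  · subst h2; decide
  by_cases h3 : s = "two-pass"
  · subst h3; decide
  by_cases h4 : s = "chain-of-thought"
  · subst h4; decide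
  have hmk : pvRank = PySem.Dict.mk [("zero-shot-minimal", 0), ("zero-shot-structured", 1),
      ("few-shot", 2), ("two-pass", 3), ("chain-of-thought", 4)] := rfl
  rw [hmk]
  simp only [PySem.Dict.get?_mk_cons, beq_iff_eq]
  rw [if_neg (fun hh => h0 hh.symm), if_neg (fun hh => h1 hh.symm),
    if_neg (fun hh => h2 hh.symm), if_neg (fun hh => h3 hh.symm),
    if_neg (fun hh => h4 hh.symm), if_neg h0, if_neg h1, if_neg h2, if_neg h3, if_neg h4]
  simp [PySem.Dict.get?]

lemma pvRankGet_iff (o : Option String) (j : Int) :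
    pvRankGet o = some j ↔
      ((o = some "zero-shot-minimal" ∧ j = 0) ∨ (o = some "zero-shot-structured" ∧ j = 1) ∨
       (o = some "few-shot" ∧ j = 2) ∨ (o = some "two-pass" ∧ j = 3) ∨
       (o = some "chain-of-thought" ∧ j = 4)) := by
  cases o with
  | none => simp [pvRankGet]
  | some s =>
    simp only [pvRankGet, pvRank_get?, Option.some.injEq]
    split_ifs <;> simp_all <;> exact eq_comm

lemma pvIdx_iff (templates : List (String × List (String × String))) (j : Int) :
    j ∈ pvIdx templates ↔ j ∈ ([0, 1, 2, 3, 4] : List Int) ∧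
      (templates.any (fun kc =>
        !(PySem.Str.startswith kc.1 "_") &&
          (pvSlugGet kc.2 == some (PySem.List.pyGetD pvPrimary j "")))) = true := by
  simp only [pvIdx, List.mem_filterMap, List.any_eq_true, Bool.and_eq_true,
    Bool.not_eq_true', beq_iff_eq]
  constructor
  · rintro ⟨kc, hkc, hf⟩
    rcases hC : PySem.Str.startswith kc.1 "_" with _ | _
    · rw [hC] at hf
      simp only [Bool.false_eq_true, if_false] at hf
      rcases (pvRankGet_iff _ j).1 hf with ⟨hs, rfl⟩ | ⟨hs, rfl⟩ | ⟨hs, rfl⟩ | ⟨hs, rfl⟩ | ⟨hs, rfl⟩ <;>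
        exact ⟨by simp, kc, hkc, hC, hs⟩
    · rw [hC] at hf
      simp at hf
  · rintro ⟨hj5, kc, hkc, hu, hs⟩
    refine ⟨kc, hkc, ?_⟩
    rw [hu]
    simp only [Bool.false_eq_true, if_false]
    have hj5' : j = 0 ∨ j = 1 ∨ j = 2 ∨ j = 3 ∨ j = 4 := by simpa using hj5
    rcases hj5' with rfl | rfl | rfl | rfl | rfl <;> (rw [hs]; rfl)

lemma pvIdx_range {l : List (String × List (String × String))} {j : Int} (h : j ∈ pvIdx l) :
    j ∈ ([0, 1, 2, 3, 4] : List Int) :=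
  ((pvIdx_iff l j).1 h).1

lemma pvLoop_spec (l : List (String × List (String × String))) (found : PySem.Set Int)
    (hnd : found.Nodup) (hr : ∀ j ∈ found, j ∈ ([0, 1, 2, 3, 4] : List Int)) :
    (pvLoop l found).Nodup ∧ (∀ j, j ∈ pvLoop l found ↔ j ∈ found ∨ j ∈ pvIdx l) := by
  induction l generalizing found with
  | nil => exact ⟨hnd, by simp [pvLoop, pvIdx]⟩
  | cons kc rest ih =>
    rcases hC : PySem.Str.startswith kc.1 "_" with _ | _
    · -- not an underscore key: the loop body runs
      have hC' : PySem.Chars.startswith kc.1.toList ['_'] = false := by simpa using hC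
      rcases hg : pvRankGet (pvSlugGet kc.2) with _ | i
      · have := ih found hnd hr
        simpa [pvLoop, hC', hg, pvIdx, List.filterMap_cons] using this
      · have hi : i ∈ ([0, 1, 2, 3, 4] : List Int) := by
          rcases (pvRankGet_iff _ i).1 hg with ⟨_, rfl⟩ | ⟨_, rfl⟩ | ⟨_, rfl⟩ | ⟨_, rfl⟩ | ⟨_, rfl⟩ <;>
            simp
        have hnd' : (PySem.Set.add found i).Nodup := PySem.Set.nodup_add found i hnd
        have hr' : ∀ j ∈ PySem.Set.add found i, j ∈ ([0, 1, 2, 3, 4] : List Int) := by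
          intro j hj
          rcases (PySem.Set.mem_add _ _ _).1 hj with hj | rfl
          · exact hr j hj
          · exact hi
        have hidx : pvIdx (kc :: rest) = i :: pvIdx rest := by
          simp [pvIdx, hC', hg]
        by_cases hlen : (PySem.Set.add found i).length = pvPrimary.length
        · -- break: found' already holds all five ranks
          have hres : pvLoop (kc :: rest) found = PySem.Set.add found i := by
            simp [pvLoop, hC', hg, PySem.Set.len, hlen]
          have hperm : (PySem.Set.add found i).Perm ([0, 1, 2, 3, 4] : List Int) :=
            (hnd'.subperm hr').perm_of_length_le (by simpa [pvPrimary] using hlen.ge)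
          refine ⟨by rw [hres]; exact hnd', ?_⟩
          intro j
          rw [hres, hidx]
          constructor
          · intro hj
            rcases (PySem.Set.mem_add _ _ _).1 hj with hj | rfl
            · exact Or.inl hj
            · exact Or.inr (by simp)
          · rintro (hj | hj)
            · exact (PySem.Set.mem_add _ _ _).2 (Or.inl hj)
            · rcases List.mem_cons.1 hj with rfl | hj
              · exact (PySem.Set.mem_add _ _ _).2 (Or.inr rfl)
              · exact hperm.mem_iff.2 (pvIdx_range hj)
        · have hres : pvLoop (kc :: rest) found = pvLoop rest (PySem.Set.add found i) := by
            simp [pvLoop, hC', hg, PySem.Set.len, hlen]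
          obtain ⟨h1, h2⟩ := ih (PySem.Set.add found i) hnd' hr'
          refine ⟨by rw [hres]; exact h1, ?_⟩
          intro j
          rw [hres, h2 j, hidx, PySem.Set.mem_add _ _ _]
          simp only [List.mem_cons]
          tauto
    · -- underscore key: skipped
      have hC' : PySem.Chars.startswith kc.1.toList ['_'] = true := by simpa using hC
      have := ih found hnd hr
      simpa [pvLoop, hC', pvIdx, List.filterMap_cons] using this

lemma pvMap_filter (p : String → Bool) :
    ((([0, 1, 2, 3, 4] : List Int).filter
        (fun j => p (PySem.List.pyGetD pvPrimary j ""))).map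
      (fun i => PySem.List.pyGetD pvPrimary i "")) = pvPrimary.filter p := by
  rw [pvPrimary_eq]
  by_cases h0 : p "zero-shot-minimal" <;> by_cases h1 : p "zero-shot-structured" <;>
    by_cases h2 : p "few-shot" <;> by_cases h3 : p "two-pass" <;>
    by_cases h4 : p "chain-of-thought" <;>
      simp [pvLits, h0, h1, h2, h3, h4, pvGet1, pvGet2, pvGet3, pvGet4]

-- ===== VERDICT (by name: the statement is the Claim_ definition above) =====
theorem get_primary_prompt_slugs_spec : Claim_equal_get_primary_prompt_slugs := by
  intro templates _
  unfold Spec_get_primary_prompt_slugs get_primary_prompt_slugs get_primary_prompt_slugs_alt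
  obtain ⟨hnd, hmem⟩ := pvLoop_spec templates PySem.Set.empty (by simp [PySem.Set.empty])
    (by simp [PySem.Set.empty])
  have hT :
      PySem.List.sorted (pvLoop templates PySem.Set.empty) (fun x => x) false =
        ([0, 1, 2, 3, 4] : List Int).filter (fun j =>
          templates.any (fun kc =>
            !(PySem.Str.startswith kc.1 "_") &&
              (pvSlugGet kc.2 == some (PySem.List.pyGetD pvPrimary j "")))) := by
    apply PySem.List.sorted_eq_of_perm_of_pairwise_lt
    · refine (List.perm_ext_iff_of_nodup (List.Nodup.filter _ (by decide)) hnd).2 ?_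
      intro j
      rw [List.mem_filter, hmem j]
      simp only [PySem.Set.empty, List.not_mem_nil, false_or]
      exact (pvIdx_iff templates j).symm
    · exact List.Pairwise.filter _ (by decide : ([0, 1, 2, 3, 4] : List Int).Pairwise (· < ·))
  simp only [hT]
  exact (pvMap_filter _).symm
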